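-- pv_equiv track=rewrite | github.com/JenishPraveenKumarG/product-based-company-DSA | sliding-window/binary_subarray_with_sum_k.py | binary_sum_k
-- ===== SOURCE A (Python) =====
-- def binary_sum_k(arr,k):
--     if k < 0:
--         return 0
--     n = len(arr)
--     cnt = 0
--     sum_ = 0
--     l = 0
--     for r in range(n):
--         sum_+= arr[r]
--
--         while sum_>k:
--             sum_ -= arr[l]
--             l+=1
--
--         cnt += r-l+1
--
--     return cnt
-- ===== SOURCE B (Python) =====
-- def binary_sum_k(arr, k):
--     if k < 0:
--         return 0
--     P = [0]
--     for x in arr: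
--         P.append(P[-1] + x)
--     cnt = 0
--     for r in range(len(arr)):
--         # bisect_left on the non-decreasing prefix array: first l with P[l] >= P[r+1] - k
--         t = P[r + 1] - k
--         lo, hi = 0, r + 1
--         while lo < hi:
--             mid = (lo + hi) // 2
--             if P[mid] < t:
--                 lo = mid + 1
--             else:
--                 hi = mid
--         cnt += r + 1 - lo
--     return cnt
-- ===== Notes on version B (the rewrite author's own statement) =====
-- stated objective: alternative
-- what changed: B drops the sliding window entirely: it builds the prefix-sum array once and, for each right endpoint, runs a fresh bisect_left binary search on the non-decreasing prefix array for the first admissible left endpoint, instead of carrying a running window sum and a persistent left pointer.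
-- outside the precondition, e.g. on binary_sum_k([1, -2, 1], 0): A returns 3, B returns 5
import Mathlib
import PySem

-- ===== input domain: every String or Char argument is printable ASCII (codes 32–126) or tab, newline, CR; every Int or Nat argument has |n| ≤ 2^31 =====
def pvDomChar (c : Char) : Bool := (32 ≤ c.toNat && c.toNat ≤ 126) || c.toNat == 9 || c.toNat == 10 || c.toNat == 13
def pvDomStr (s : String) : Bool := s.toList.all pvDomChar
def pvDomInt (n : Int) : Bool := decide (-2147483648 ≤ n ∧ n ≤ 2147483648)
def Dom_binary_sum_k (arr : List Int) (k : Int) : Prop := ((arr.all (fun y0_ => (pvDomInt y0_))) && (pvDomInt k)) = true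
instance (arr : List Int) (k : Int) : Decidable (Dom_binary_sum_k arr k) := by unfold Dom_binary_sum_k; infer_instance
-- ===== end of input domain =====

-- A counts subarrays with sum ≤ k by a sliding window with a persistent left pointer and a
-- running window sum; B (alternative, no timing run speed claim) instead builds the prefix-sum
-- array once and answers each right endpoint with an independent bisect_left binary search on
-- that non-decreasing array. Pre_ restricts to arrays of non-negative entries — the function's
-- natural (binary) domain, on which the prefix array is monotone and the binary search is valid.


-- ===== PORT A =====
-- inner `while sum_ > k: sum_ -= arr[l]; l += 1`; the fuel only caps the iteration
-- count (r+1 at the call site suffices: the loop stops at l = r+1 at the latest once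
-- k ≥ 0), arr[l] is in range on every reachable iteration (l ≤ r < len arr)
def whileA (arr : List Int) (k : Int) : Int → Nat → Nat → Int × Nat
  | s, l, 0 => (s, l)
  | s, l, (fuel+1) =>
      if k < s then whileA arr k (s - PySem.List.pyGetD arr (l : Int) 0) (l + 1) fuel
      else (s, l)

def binary_sum_k (arr : List Int) (k : Int) : Int :=
  if k < 0 then 0
  else
    -- state (cnt, sum_, l); `for r in range(n)`
    ((List.range arr.length).foldl
      (fun (st : Int × Int × Nat) (r : Nat) =>
        let s := st.2.1 + PySem.List.pyGetD arr (r : Int) 0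
        let p := whileA arr k s st.2.2 (r + 1)
        (st.1 + ((r : Int) - (p.2 : Int) + 1), p.1, p.2))
      ((0 : Int), (0 : Int), (0 : Nat))).1

-- ===== PORT B =====
-- `P = [0]` then `for x in arr: P.append(P[-1] + x)`
def prefixB (arr : List Int) : List Int :=
  arr.foldl (fun P x => P ++ [PySem.List.pyGetD P (-1) 0 + x]) [0]

-- the hand-written bisect_left loop `while lo < hi: mid = (lo+hi)//2; …`
-- ((lo+hi)//2 on non-negative ints is Nat division)
def bsearch (P : List Int) (t : Int) (lo hi : Nat) : Nat :=
  if lo < hi then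
    let mid := (lo + hi) / 2
    if PySem.List.pyGetD P (mid : Int) 0 < t then bsearch P t (mid + 1) hi
    else bsearch P t lo mid
  else lo
termination_by hi - lo
decreasing_by all_goals omega

def binary_sum_k_alt (arr : List Int) (k : Int) : Int :=
  if k < 0 then 0
  else
    let P := prefixB arr
    -- `for r in range(len(arr))`, accumulating cnt
    (List.range arr.length).foldl
      (fun (cnt : Int) (r : Nat) =>
        let lo := bsearch P (PySem.List.pyGetD P ((r : Int) + 1) 0 - k) 0 (r + 1)
        cnt + ((r : Int) + 1 - (lo : Int)))
      0

-- ===== PRECONDITION & SPEC =====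
-- Pre_ restricts to arrays of non-negative entries, the natural domain of a function counting
-- BINARY subarrays: on arrays with negative entries (which A still accepts) the prefix array is
-- not monotone, the window's answer is history-dependent, and B's binary search differs.
def Pre_binary_sum_k (arr : List Int) (k : Int) : Prop := ∀ x ∈ arr, 0 ≤ x
instance (arr : List Int) (k : Int) : Decidable (Pre_binary_sum_k arr k) := by unfold Pre_binary_sum_k; infer_instance

def pvWitness_binary_sum_k : List Int × Int := ([1, 0, 1, 0, 1], 2)

def Spec_binary_sum_k (arr : List Int) (k : Int) (out : Int) : Prop := out = binary_sum_k_alt arr k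
instance (arr : List Int) (k : Int) (out : Int) : Decidable (Spec_binary_sum_k arr k out) := by unfold Spec_binary_sum_k; infer_instance

-- ===== CLAIM (what is proved, stated in full; the proofs are below) =====
def Claim_equal_binary_sum_k : Prop := ∀ (arr : List Int) (k : Int), Dom_binary_sum_k arr k → Pre_binary_sum_k arr k → Spec_binary_sum_k arr k (binary_sum_k arr k)

-- ===== LEMMAS AND PROOFS =====

-- g arr i = sum of the first i entries (the value of P[i])
def g (arr : List Int) (i : Nat) : Int := (arr.take i).sum

theorem g_succ (arr : List Int) (j : Nat) (h : j < arr.length) :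
    g arr (j + 1) = g arr j + arr.getD j 0 := by
  unfold g
  rw [List.take_add_one, List.sum_append]
  simp [List.getD, List.getElem?_eq_getElem h]

theorem g_succ_ge (arr : List Int) (j : Nat) (h : j ≥ arr.length) :
    g arr (j + 1) = g arr j := by
  unfold g
  rw [List.take_of_length_le (by omega), List.take_of_length_le (by omega)]

theorem g_mono (arr : List Int) (hpos : ∀ x ∈ arr, 0 ≤ x) {i j : Nat} (hij : i ≤ j) :
    g arr i ≤ g arr j := by
  induction j with
  | zero =>
    have : i = 0 := by omega
    subst this; exact le_refl _
  | succ j ih =>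
    rcases Nat.lt_or_ge i (j + 1) with h | h
    · have h1 : g arr i ≤ g arr j := ih (by omega)
      rcases Nat.lt_or_ge j arr.length with hj | hj
      · have := g_succ arr j hj
        have hx : 0 ≤ arr.getD j 0 := by
          have : arr.getD j 0 ∈ arr := by
            rw [List.getD_eq_getElem _ _ hj]; exact List.getElem_mem hj
          exact hpos _ this
        omega
      · rw [g_succ_ge arr j hj]; exact h1
    · have : i = j + 1 := by omega
      subst this; exact le_refl _

-- B's prefix list is the list of partial sums of arr
theorem prefixB_eq (arr : List Int) :
    prefixB arr = (List.range (arr.length + 1)).map (fun i => (arr.take i).sum) := by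
  induction arr using List.reverseRecOn with
  | nil => simp [prefixB]
  | append_singleton ys y ih =>
    have hstep : prefixB (ys ++ [y])
        = prefixB ys ++ [PySem.List.pyGetD (prefixB ys) (-1) 0 + y] := by
      simp only [prefixB, List.foldl_append, List.foldl_cons, List.foldl_nil]
    have hlast : PySem.List.pyGetD (prefixB ys) (-1) 0 = ys.sum := by
      rw [ih, List.range_succ, List.map_append]
      simp [PySem.List.pyGetD_neg_one_append_singleton]
    rw [hstep, hlast, ih]
    have hlen : (ys ++ [y]).length = ys.length + 1 := by simp
    rw [hlen]
    conv_rhs => rw [List.range_succ]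
    rw [List.map_append]
    congr 1
    · apply List.map_congr_left
      intro i hi
      have hile : i ≤ ys.length := by
        have := List.mem_range.mp hi; omega
      rw [List.take_append_of_le_length hile]
    · have : (ys ++ [y]).take (ys.length + 1) = ys ++ [y] := by
        apply List.take_of_length_le; simp
      simp [this]

-- reading the prefix list: P[i] = g arr i for i ≤ len
theorem prefixB_getD (arr : List Int) (i : Nat) (h : i ≤ arr.length) :
    PySem.List.pyGetD (prefixB arr) ((i : Nat) : Int) 0 = g arr i := by
  rw [PySem.List.pyGetD_natCast, prefixB_eq,
      PySem.List.getD_map_range _ _ _ _ (by omega)]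
  rfl

-- characterisation of A's inner while loop on a non-negative array
theorem whileA_spec (arr : List Int) (k : Int) (hk : 0 ≤ k)
    (hpos : ∀ x ∈ arr, 0 ≤ x) (r : Nat) (hr : r < arr.length) :
    ∀ (fuel l0 : Nat), l0 ≤ r + 1 → r + 1 - l0 ≤ fuel →
      ∃ m : Nat,
        whileA arr k (g arr (r + 1) - g arr l0) l0 fuel = (g arr (r + 1) - g arr m, m)
        ∧ l0 ≤ m ∧ m ≤ r + 1
        ∧ g arr (r + 1) - g arr m ≤ k
        ∧ (∀ i, l0 ≤ i → i < m → k < g arr (r + 1) - g arr i) := by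
  intro fuel
  induction fuel with
  | zero =>
    intro l0 hl0 hf
    have : l0 = r + 1 := by omega
    subst this
    exact ⟨r + 1, rfl, le_refl _, le_refl _, by omega, by omega⟩
  | succ fuel ih =>
    intro l0 hl0 hf
    by_cases hc : k < g arr (r + 1) - g arr l0
    · have hl0r : l0 < r + 1 := by
        by_contra h
        have : l0 = r + 1 := by omega
        subst this; omega
      have harr : PySem.List.pyGetD arr ((l0 : Nat) : Int) 0 = arr.getD l0 0 := by
        rw [PySem.List.pyGetD_natCast]
      have hs : g arr (r + 1) - g arr l0 - PySem.List.pyGetD arr ((l0 : Nat) : Int) 0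
          = g arr (r + 1) - g arr (l0 + 1) := by
        rw [harr, g_succ arr l0 (by omega)]; ring
      have heq : whileA arr k (g arr (r + 1) - g arr l0) l0 (fuel + 1)
          = whileA arr k (g arr (r + 1) - g arr l0
              - PySem.List.pyGetD arr ((l0 : Nat) : Int) 0) (l0 + 1) fuel := by
        show (if k < g arr (r + 1) - g arr l0 then _ else _) = _
        rw [if_pos hc]
      obtain ⟨m, h1, h2, h3, h4, h5⟩ := ih (l0 + 1) (by omega) (by omega)
      refine ⟨m, ?_, by omega, h3, h4, ?_⟩
      · rw [heq, hs]; exact h1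
      · intro i hi1 hi2
        rcases Nat.lt_or_ge i (l0 + 1) with h | h
        · have : i = l0 := by omega
          subst this; exact hc
        · exact h5 i h hi2
    · refine ⟨l0, ?_, le_refl _, hl0, by omega, by omega⟩
      show (if k < g arr (r + 1) - g arr l0 then _ else _) = _
      rw [if_neg hc]

-- characterisation of B's binary search on the monotone prefix array
theorem bsearch_spec (arr : List Int) (hpos : ∀ x ∈ arr, 0 ≤ x) (t : Int)
    (N : Nat) (hN : N ≤ arr.length) :
    ∀ (d lo hi : Nat), hi - lo ≤ d → lo ≤ hi → hi ≤ N →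
      (∀ i, i < lo → g arr i < t) → (∀ i, hi ≤ i → i ≤ N → t ≤ g arr i) →
      let m := bsearch (prefixB arr) t lo hi
      (∀ i, i < m → g arr i < t) ∧ (∀ i, m ≤ i → i ≤ N → t ≤ g arr i) ∧ m ≤ N := by
  intro d
  induction d with
  | zero =>
    intro lo hi hd hlohi hhiN hlo hhi
    have : lo = hi := by omega
    subst this
    rw [bsearch]
    simp only [lt_irrefl, if_false]
    exact ⟨hlo, hhi, hhiN⟩
  | succ d ih =>
    intro lo hi hd hlohi hhiN hlo hhi
    by_cases hlt : lo < hi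
    · have hmid1 : lo ≤ (lo + hi) / 2 := by omega
      have hmid2 : (lo + hi) / 2 < hi := by omega
      have hPmid : PySem.List.pyGetD (prefixB arr) (((lo + hi) / 2 : Nat) : Int) 0
          = g arr ((lo + hi) / 2) := prefixB_getD arr _ (by omega)
      rw [bsearch]
      simp only [hlt, if_true, hPmid]
      by_cases hcmp : g arr ((lo + hi) / 2) < t
      · rw [if_pos hcmp]
        refine ih ((lo + hi) / 2 + 1) hi (by omega) (by omega) hhiN ?_ hhi
        intro i hi2
        exact lt_of_le_of_lt (g_mono arr hpos (by omega)) hcmp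
      · rw [if_neg hcmp]
        refine ih lo ((lo + hi) / 2) (by omega) (by omega) (by omega) hlo ?_
        intro i hi1 hi2
        exact le_trans (not_lt.mp hcmp) (g_mono arr hpos hi1)
    · rw [bsearch]
      simp only [hlt, if_false]
      have : lo = hi := by omega
      subst this
      exact ⟨hlo, hhi, hhiN⟩

-- the "first index where g reaches t" characterisation is unique
theorem least_unique (arr : List Int) (t : Int) (N m1 m2 : Nat)
    (h1a : ∀ i, i < m1 → g arr i < t) (h1b : ∀ i, m1 ≤ i → i ≤ N → t ≤ g arr i) (h1c : m1 ≤ N)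
    (h2a : ∀ i, i < m2 → g arr i < t) (h2b : ∀ i, m2 ≤ i → i ≤ N → t ≤ g arr i) (h2c : m2 ≤ N) :
    m1 = m2 := by
  by_contra hne
  rcases Nat.lt_or_ge m1 m2 with h | h
  · have := h2a m1 h
    have := h1b m1 (le_refl _) h1c
    omega
  · have hlt : m2 < m1 := by omega
    have := h1a m2 hlt
    have := h2b m2 (le_refl _) h2c
    omega

-- proof-side names for the two folds' step functions (definitionally the ports' lambdas)
def stepA (arr : List Int) (k : Int) : (Int × Int × Nat) → Nat → (Int × Int × Nat) :=
  fun st r =>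
    let s := st.2.1 + PySem.List.pyGetD arr (r : Int) 0
    let p := whileA arr k s st.2.2 (r + 1)
    (st.1 + ((r : Int) - (p.2 : Int) + 1), p.1, p.2)

def stepB (arr : List Int) (k : Int) : Int → Nat → Int :=
  fun cnt r =>
    let lo := bsearch (prefixB arr) (PySem.List.pyGetD (prefixB arr) ((r : Int) + 1) 0 - k) 0 (r + 1)
    cnt + ((r : Int) + 1 - (lo : Int))

-- joint invariant of the two outer loops, truncated to the first r iterations
theorem fold_invariant (arr : List Int) (k : Int) (hk : 0 ≤ k)
    (hpos : ∀ x ∈ arr, 0 ≤ x) (r : Nat) (hr : r ≤ arr.length) :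
    let a := (List.range r).foldl (stepA arr k) (0, 0, 0)
    let b := (List.range r).foldl (stepB arr k) 0
    a.2.2 ≤ r
    ∧ a.2.1 = g arr r - g arr a.2.2
    ∧ g arr r - g arr a.2.2 ≤ k
    ∧ (∀ i, i < a.2.2 → k < g arr r - g arr i)
    ∧ a.1 = b := by
  induction r with
  | zero =>
    simp only [List.range_zero, List.foldl_nil]
    exact ⟨le_refl _, by simp [g], by simpa [g] using hk, by intro i hi; omega, trivial⟩
  | succ r ih =>
    obtain ⟨ih1, ih2, ih3, ih4, ih5⟩ := ih (by omega)
    have hrlen : r < arr.length := by omega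
    rw [List.range_succ, List.foldl_append, List.foldl_append]
    simp only [List.foldl_cons, List.foldl_nil]
    set a := (List.range r).foldl (stepA arr k) (0, 0, 0) with ha
    set b := (List.range r).foldl (stepB arr k) 0 with hb
    -- A's new window sum is g (r+1) - g l₀
    have hs : a.2.1 + PySem.List.pyGetD arr ((r : Nat) : Int) 0
        = g arr (r + 1) - g arr a.2.2 := by
      rw [PySem.List.pyGetD_natCast, ih2, g_succ arr r hrlen]; ring
    obtain ⟨m, hw, hm1, hm2, hm3, hm4⟩ :=
      whileA_spec arr k hk hpos r hrlen (r + 1) a.2.2 (by omega) (by omega)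
    -- all indices below m fail at r+1
    have hfail : ∀ i, i < m → g arr i < g arr (r + 1) - k := by
      intro i hi
      rcases Nat.lt_or_ge i a.2.2 with h | h
      · have h1 := ih4 i h
        have h2 : g arr r ≤ g arr (r + 1) := g_mono arr hpos (by omega)
        omega
      · have := hm4 i h hi
        omega
    have hsucc : ∀ i, m ≤ i → i ≤ r + 1 → g arr (r + 1) - k ≤ g arr i := by
      intro i hi1 hi2
      have := g_mono arr hpos hi1
      omega
    -- B's binary search lands on the same m
    have hP : PySem.List.pyGetD (prefixB arr) (((r : Nat) : Int) + 1) 0 = g arr (r + 1) := by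
      have h1 : (((r : Nat) : Int) + 1) = (((r + 1 : Nat)) : Int) := by push_cast; ring
      rw [h1]; exact prefixB_getD arr (r + 1) (by omega)
    have hbs := bsearch_spec arr hpos (g arr (r + 1) - k) (r + 1) (by omega)
      (r + 1) 0 (r + 1) (by omega) (by omega) (le_refl _) (by omega)
      (fun i h1 h2 => hsucc i (by omega) h2)
    obtain ⟨hb1, hb2, hb3⟩ := hbs
    have hmeq : bsearch (prefixB arr) (g arr (r + 1) - k) 0 (r + 1) = m :=
      least_unique arr (g arr (r + 1) - k) (r + 1) _ m hb1 hb2 hb3 hfail hsucc hm2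
    simp only [stepA, stepB, hs, hw, hP, hmeq]
    refine ⟨hm2, trivial, hm3, ?_, ?_⟩
    · intro i hi
      rcases Nat.lt_or_ge i a.2.2 with h | h
      · have h1 := ih4 i h
        have h2 : g arr r ≤ g arr (r + 1) := g_mono arr hpos (by omega)
        omega
      · exact hm4 i h hi
    · rw [ih5]; push_cast; ring

-- ===== VERDICT (by name: the statement is the Claim_ definition above) =====
theorem binary_sum_k_spec : Claim_equal_binary_sum_k := by
  intro arr k _ hpre
  unfold Spec_binary_sum_k
  by_cases hk : k < 0
  · simp [binary_sum_k, binary_sum_k_alt, hk]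
  · have hk' : 0 ≤ k := by omega
    obtain ⟨-, -, -, -, h⟩ := fold_invariant arr k hk' hpre arr.length le_rfl
    simp only [binary_sum_k, binary_sum_k_alt, hk, if_false]
    exact h
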